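-- pv_equiv track=rewrite | github.com/pogo-opossum/note_ml_try | codici/create_notebook.py | _split_code_cell_at_sections
-- ===== SOURCE A (Python) =====
-- from typing import List, Dict, Tuple
--
-- def _split_code_cell_at_sections(code: str) -> List[str]:
--     """
--     Split code at section markers.
--
--     Section markers are lines like:
--         # ============================================================================
--         # SECTION N: TOPIC
--         # ============================================================================
--     """
--     lines = code.split('\n')
--     sections = []
--     current_section = []
--
--     for line in lines:
--         # Check if line is a section marker
--         if ('# ============================================================================' in line or
--             line.strip().startswith('# SECTION') or
--             line.strip().startswith('# SUBSECTION')):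
--
--             if current_section:
--                 sections.append('\n'.join(current_section).strip())
--                 current_section = []
--
--         current_section.append(line)
--
--     if current_section:
--         sections.append('\n'.join(current_section).strip())
--
--     return [s for s in sections if s]  # Remove empty sections
-- ===== SOURCE B (Python) =====
-- from typing import List
--
-- _BAR = '# ============================================================================'
--
-- def _is_marker(line: str) -> bool:
--     s = line.strip()
--     return _BAR in line or s.startswith('# SECTION') or s.startswith('# SUBSECTION')
--
-- def _split_code_cell_at_sections(code: str) -> List[str]:
--     """Split code at section markers: chunk the lines by scanning each
--     maximal run that starts at a marker (or at line 0), then join+strip."""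
--     lines = code.split('\n')
--     chunks = []
--     i, n = 0, len(lines)
--     while i < n:
--         j = i + 1
--         while j < n and not _is_marker(lines[j]):
--             j += 1
--         chunks.append(lines[i:j])
--         i = j
--     return [s for s in ('\n'.join(c).strip() for c in chunks) if s]
-- ===== Notes on version B (the rewrite author's own statement) =====
-- stated objective: alternative
-- what changed: Replaced A's single-pass accumulate-and-flush state machine (sections/current_section mutated inside one loop with an end-of-loop flush) by a two-phase decomposition: first cut the line list into maximal chunks (each chunk runs from a start line to just before the next marker line), then map join-with-newline plus strip over the chunks and filter out empties.
import Mathlib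
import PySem

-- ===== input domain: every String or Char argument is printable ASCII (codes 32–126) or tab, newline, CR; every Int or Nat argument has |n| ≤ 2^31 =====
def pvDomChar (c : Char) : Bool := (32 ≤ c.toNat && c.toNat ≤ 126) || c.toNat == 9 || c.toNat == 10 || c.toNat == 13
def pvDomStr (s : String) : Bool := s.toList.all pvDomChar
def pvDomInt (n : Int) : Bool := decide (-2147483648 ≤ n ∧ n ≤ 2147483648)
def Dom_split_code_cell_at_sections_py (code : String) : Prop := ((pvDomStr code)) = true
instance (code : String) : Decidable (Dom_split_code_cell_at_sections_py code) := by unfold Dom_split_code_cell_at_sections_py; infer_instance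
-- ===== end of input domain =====

-- B replaces A's accumulate-and-flush state machine by a two-phase chunk-then-map
-- decomposition (scan out each maximal chunk, then join/strip/filter); objective: alternative.

-- ===== PORT A =====
-- lines are handled as List Char (PySem strings); the marker test shared by A's loop and B's _is_marker
def pvMarker (line : List Char) : Bool :=
  PySem.Chars.isIn ("# ============================================================================").toList line
  || PySem.Chars.startswith (PySem.Chars.strip line) ("# SECTION").toList
  || PySem.Chars.startswith (PySem.Chars.strip line) ("# SUBSECTION").toList

-- '\n'.join(cur).strip()
def pvEmit (cur : List (List Char)) : String := String.ofList (PySem.Chars.strip (PySem.Chars.join ['\n'] cur))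

-- one iteration of A's for-loop over the state (sections, current_section)
def pvStepA (st : List String × List (List Char)) (line : List Char) :
    List String × List (List Char) :=
  if pvMarker line then
    if st.2 ≠ [] then (st.1 ++ [pvEmit st.2], [line])
    else (st.1, st.2 ++ [line])
  else (st.1, st.2 ++ [line])

-- A's finalisation after the loop (the trailing 'if current_section:' flush)
def pvFinish (st : List String × List (List Char)) : List String :=
  if st.2 ≠ [] then st.1 ++ [pvEmit st.2] else st.1

def split_code_cell_at_sections_py (code : String) : List String :=
  let lines := PySem.Chars.splitOn code.toList ['\n']
  (pvFinish (lines.foldl pvStepA ([], []))).filter (fun s => s != "")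

-- ===== PORT B =====
-- outer while-loop of B: peel off one maximal chunk (the inner index-advancing while = takeWhile/dropWhile)
def pvChunks : List (List Char) → List (List (List Char))
  | [] => []
  | l :: rest =>
      (l :: rest.takeWhile (fun s => !pvMarker s)) :: pvChunks (rest.dropWhile (fun s => !pvMarker s))
  termination_by ls => ls.length
  decreasing_by exact Nat.lt_succ_of_le (List.length_dropWhile_le _ _)

def split_code_cell_at_sections_py_alt (code : String) : List String :=
  ((pvChunks (PySem.Chars.splitOn code.toList ['\n'])).map pvEmit).filter (fun s => s != "")

-- ===== PRECONDITION & SPEC =====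
def Spec_split_code_cell_at_sections_py (code : String) (out : List String) : Prop := out = split_code_cell_at_sections_py_alt code
instance (code : String) (out : List String) : Decidable (Spec_split_code_cell_at_sections_py code out) := by unfold Spec_split_code_cell_at_sections_py; infer_instance

-- ===== CLAIM (what is proved, stated in full; the proofs are below) =====
def Claim_equal_split_code_cell_at_sections_py : Prop := ∀ (code : String), Dom_split_code_cell_at_sections_py code → Spec_split_code_cell_at_sections_py code (split_code_cell_at_sections_py code)

-- ===== LEMMAS AND PROOFS =====

-- loop invariant: with a nonempty current chunk, finishing A's remaining fold emits the chunk
-- being built (extended by the marker-free prefix) followed by B's chunks of the rest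
lemma pv_loop (rest : List (List Char)) : ∀ (secs : List String) (cur : List (List Char)), cur ≠ [] →
    pvFinish (rest.foldl pvStepA (secs, cur)) =
      secs ++ (((cur ++ rest.takeWhile (fun s => !pvMarker s)) ::
                pvChunks (rest.dropWhile (fun s => !pvMarker s))).map pvEmit) := by
  induction rest with
  | nil => intro secs cur h; simp [pvFinish, pvChunks, h]
  | cons x xs ih =>
      intro secs cur h
      simp only [List.foldl_cons]
      by_cases hm : pvMarker x
      · rw [show pvStepA (secs, cur) x = (secs ++ [pvEmit cur], [x]) by simp [pvStepA, hm, h]]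
        rw [ih (secs ++ [pvEmit cur]) [x] (by simp)]
        simp [hm, pvChunks]
      · rw [show pvStepA (secs, cur) x = (secs, cur ++ [x]) by simp [pvStepA, hm]]
        rw [ih secs (cur ++ [x]) (by simp)]
        simp [hm]

-- ===== VERDICT (by name: the statement is the Claim_ definition above) =====
theorem split_code_cell_at_sections_py_spec : Claim_equal_split_code_cell_at_sections_py := by
  intro code _
  unfold Spec_split_code_cell_at_sections_py split_code_cell_at_sections_py split_code_cell_at_sections_py_alt
  cases hl : PySem.Chars.splitOn code.toList ['\n'] with
  | nil => simp [pvFinish, pvChunks]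
  | cons l rest =>
      simp only [List.foldl_cons]
      rw [show pvStepA ([], []) l = ([], [l]) by by_cases hm : pvMarker l <;> simp [pvStepA, hm]]
      rw [pv_loop rest [] [l] (by simp)]
      simp [pvChunks]
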